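-- pv_equiv track=rewrite | github.com/RISHIT7/Programming | COL/COL100/Lab_6/q1.py | remove_common
-- ===== SOURCE A (Python) =====
-- def remove_common(a, b):
--     ans = []
--     for i in range(len(a)):
--         if a[i] not in b:
--             ans.append(a[i])
--         else:
--             b.remove(a[i])
--     return [ans, b]
-- ===== SOURCE B (Python) =====
-- def remove_common(a, b):
--     cb = {}
--     for x in b:
--         cb[x] = cb.get(x, 0) + 1
--     budget = dict(cb)
--     ans = []
--     for x in a:
--         if budget.get(x, 0) > 0:
--             budget[x] = budget[x] - 1
--         else:
--             ans.append(x)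
--     kept = []
--     seen = {}
--     for x in b:
--         s = seen.get(x, 0)
--         seen[x] = s + 1
--         if s >= cb[x] - budget[x]:
--             kept.append(x)
--     b[:] = kept
--     return [ans, b]
-- ===== Notes on version B (the rewrite author's own statement) =====
-- stated objective: faster
-- what changed: Replaces A's single interleaved loop doing 'x in b' membership tests and b.remove calls (each a linear scan) with dict count tables: one pass over b builds counts, one pass over a consumes a decrementing budget to build ans, and one seen-counter pass over b keeps only occurrences past each value's consumed quota.
import Mathlib
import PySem

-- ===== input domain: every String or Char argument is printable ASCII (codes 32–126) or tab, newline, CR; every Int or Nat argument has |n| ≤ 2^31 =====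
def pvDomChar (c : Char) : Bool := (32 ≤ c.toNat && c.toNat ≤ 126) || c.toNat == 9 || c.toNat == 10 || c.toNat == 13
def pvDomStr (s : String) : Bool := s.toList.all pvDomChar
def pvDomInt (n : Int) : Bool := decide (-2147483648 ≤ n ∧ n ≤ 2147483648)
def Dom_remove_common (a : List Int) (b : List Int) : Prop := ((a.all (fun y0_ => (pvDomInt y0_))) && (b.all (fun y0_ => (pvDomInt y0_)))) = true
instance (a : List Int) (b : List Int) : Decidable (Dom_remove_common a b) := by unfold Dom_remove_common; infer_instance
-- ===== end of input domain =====

-- B replaces A's quadratic membership-test/remove loop by count tables and two linear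
-- filtering passes (objective: faster). Both A and B mutate the argument list b in place
-- (A via b.remove, B via b[:] = kept); the equivalence proved here is about the RETURN value.

-- ===== PORT A =====
def remove_common (a : List Int) (b : List Int) : List (List Int) :=
  let s := (PySem.List.pyRange 0 (a.length : Int) 1).foldl
    (fun (st : List Int × List Int) i =>
      if PySem.List.pyGetD a i 0 ∉ st.2 then
        (st.1 ++ [PySem.List.pyGetD a i 0], st.2)
      else
        (st.1, (PySem.List.remove? st.2 (PySem.List.pyGetD a i 0)).getD st.2))
    ([], b)
  [s.1, s.2]

-- ===== PORT B =====
def remove_common_alt (a : List Int) (b : List Int) : List (List Int) :=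
  let cb : PySem.Dict Int Int :=
    b.foldl (fun (d : PySem.Dict Int Int) x => d.insert x (d.getD x 0 + 1)) PySem.Dict.empty
  let st := a.foldl
    (fun (st : PySem.Dict Int Int × List Int) x =>
      if st.1.getD x 0 > 0 then (st.1.insert x (st.1.getD x 0 - 1), st.2)
      else (st.1, st.2 ++ [x]))
    (cb, [])
  let budget := st.1
  -- Python's cb[x] / budget[x] are direct lookups that always hit (x ∈ b ⇒ key present);
  -- ported as getD _ _ 0, exact on those keys.
  let kept := (b.foldl
    (fun (p : PySem.Dict Int Int × List Int) x =>
      (p.1.insert x (p.1.getD x 0 + 1),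
       if p.1.getD x 0 ≥ cb.getD x 0 - budget.getD x 0 then p.2 ++ [x] else p.2))
    (PySem.Dict.empty, [])).2
  [st.2, kept]

-- ===== PRECONDITION & SPEC =====
def Spec_remove_common (a : List Int) (b : List Int) (out : List (List Int)) : Prop := out = remove_common_alt a b
instance (a : List Int) (b : List Int) (out : List (List Int)) : Decidable (Spec_remove_common a b out) := by unfold Spec_remove_common; infer_instance

-- ===== CLAIM (what is proved, stated in full; the proofs are below) =====
def Claim_equal_remove_common : Prop := ∀ (a : List Int) (b : List Int), Dom_remove_common a b → Spec_remove_common a b (remove_common a b)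

-- ===== LEMMAS AND PROOFS =====

-- `keepSkip b f` is b with, for each value v, its first `f v` occurrences dropped:
-- the common shape of A's repeatedly-erased list and B's seen/skip filtering pass.
def keepSkip : List Int → (Int → Nat) → List Int
  | [], _ => []
  | x :: xs, f =>
    if f x = 0 then x :: keepSkip xs f
    else keepSkip xs (fun v => if v = x then f v - 1 else f v)

theorem keepSkip_zero (b : List Int) : keepSkip b (fun _ => 0) = b := by
  induction b with
  | nil => rfl
  | cons y b ih => simp [keepSkip, ih]

theorem mem_keepSkip (b : List Int) : ∀ (f : Int → Nat) (x : Int),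
    x ∈ keepSkip b f ↔ f x < b.count x := by
  induction b with
  | nil => intro f x; simp [keepSkip]
  | cons y b ih =>
    intro f x
    by_cases hxy : x = y
    · subst hxy
      by_cases hy : f x = 0
      · simp [keepSkip, hy, List.count_cons_self]
      · simp only [keepSkip, if_neg hy, ih]
        rw [show (if True then f x - 1 else f x) = f x - 1 from rfl, List.count_cons_self]
        omega
    · have hyx : ¬ y = x := fun e => hxy e.symm
      by_cases hy : f y = 0
      · simp [keepSkip, hy, List.mem_cons, hxy, ih, hyx]
      · simp only [keepSkip, if_neg hy, ih]
        rw [if_neg hxy, List.count_cons, if_neg (by simpa using hyx), Nat.add_zero]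

theorem erase_keepSkip (b : List Int) : ∀ (f : Int → Nat) (x : Int),
    f x < b.count x →
    (keepSkip b f).erase x = keepSkip b (fun v => if v = x then f v + 1 else f v) := by
  induction b with
  | nil => intro f x h; simp at h
  | cons y b ih =>
    intro f x h
    by_cases hxy : x = y
    · subst hxy
      by_cases hy : f x = 0
      · simp only [keepSkip, if_pos hy, List.erase_cons_head]
        congr 1
        funext v
        by_cases hv : v = x
        · subst hv; simp
        · simp [hv]
      · have hcount : (fun v => if v = x then f v - 1 else f v) x < b.count x := by
          show (if x = x then f x - 1 else f x) < b.count x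
          rw [if_pos rfl, List.count_cons_self] at *
          omega
        simp only [keepSkip, if_neg hy]
        rw [ih _ x hcount]
        congr 1
        funext v
        by_cases hv : v = x
        · subst hv; simp; omega
        · simp [hv]
    · have hyx : ¬ y = x := fun e => hxy e.symm
      have hx : f x < b.count x := by
        rwa [List.count_cons, if_neg (by simpa using hyx), Nat.add_zero] at h
      by_cases hy : f y = 0
      · have hy' : (if y = x then f y + 1 else f y) = 0 := by simp [hyx, hy]
        rw [show keepSkip (y :: b) f = y :: keepSkip b f from by simp [keepSkip, hy],
          List.erase_cons_tail (show ¬ (y == x) = true by simp [hyx]),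
          ih f x hx,
          show keepSkip (y :: b) (fun v => if v = x then f v + 1 else f v)
              = y :: keepSkip b (fun v => if v = x then f v + 1 else f v) from by
            simp [keepSkip, hy']]
      · have hy' : ¬ ((if y = x then f y + 1 else f y) = 0) := by simp [hyx, hy]
        have hx' : (fun v => if v = y then f v - 1 else f v) x < b.count x := by
          show (if x = y then f x - 1 else f x) < b.count x
          rw [if_neg hxy]; exact hx
        simp only [keepSkip, if_neg hy, if_neg hy']
        rw [ih _ x hx']
        congr 1
        funext v
        by_cases hv : v = x
        · subst hv; simp [hxy]
        · by_cases hv' : v = y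
          · subst hv'; simp [hyx]
          · simp [hv, hv']

-- Core invariant: A's interleaved (ans, current-b) loop over a runs in lockstep with
-- B's (budget, ans) loop, the current b being `keepSkip b f` and budget tracking count - f.
theorem mainA (a b : List Int) : ∀ (f : Int → Nat) (budget : PySem.Dict Int Int) (ans : List Int),
    (∀ v, budget.getD v 0 = (b.count v : Int) - (f v : Int)) →
    (∀ v, f v ≤ b.count v) →
    ∃ f', (∀ v, f' v ≤ b.count v) ∧
      a.foldl (fun (st : List Int × List Int) x =>
          if x ∉ st.2 then (st.1 ++ [x], st.2)
          else (st.1, (PySem.List.remove? st.2 x).getD st.2)) (ans, keepSkip b f)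
        = ((a.foldl (fun (st : PySem.Dict Int Int × List Int) x =>
              if st.1.getD x 0 > 0 then (st.1.insert x (st.1.getD x 0 - 1), st.2)
              else (st.1, st.2 ++ [x])) (budget, ans)).2, keepSkip b f') ∧
      (∀ v, (a.foldl (fun (st : PySem.Dict Int Int × List Int) x =>
              if st.1.getD x 0 > 0 then (st.1.insert x (st.1.getD x 0 - 1), st.2)
              else (st.1, st.2 ++ [x])) (budget, ans)).1.getD v 0
            = (b.count v : Int) - (f' v : Int)) := by
  induction a with
  | nil =>
    intro f budget ans h1 h2
    exact ⟨f, h2, rfl, h1⟩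
  | cons x a ih =>
    intro f budget ans h1 h2
    simp only [List.foldl_cons]
    by_cases h : f x < b.count x
    · have hxmem : x ∈ keepSkip b f := (mem_keepSkip b f x).mpr h
      have hbpos : budget.getD x 0 > 0 := by
        rw [h1 x]
        have : (f x : Int) < (b.count x : Int) := by exact_mod_cast h
        omega
      rw [if_neg (by simpa using hxmem), if_pos hbpos,
        PySem.List.remove?_eq_some_erase (keepSkip b f) x hxmem, Option.getD_some,
        erase_keepSkip b f x h]
      exact ih (fun v => if v = x then f v + 1 else f v)
        (budget.insert x (budget.getD x 0 - 1)) ans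
        (by
          intro v
          rw [PySem.Dict.getD_insert]
          by_cases hv : v = x
          · subst hv; simp [h1 v]; ring
          · simp [hv, h1 v])
        (by
          intro v
          by_cases hv : v = x
          · subst hv; simp; omega
          · simp [hv, h2 v])
    · have hxmem : x ∉ keepSkip b f := fun hm => h ((mem_keepSkip b f x).mp hm)
      have hfx : f x = b.count x := le_antisymm (h2 x) (by omega)
      have hb0 : ¬ budget.getD x 0 > 0 := by
        rw [h1 x, hfx]; omega
      rw [if_pos (by simpa using hxmem), if_neg hb0]
      exact ih f budget (ans ++ [x]) h1 h2

-- B's third pass (seen/skip filter over b) produces exactly keepSkip of the skip budgets.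
theorem keptFold (g : Int → Int) (l : List Int) : ∀ (seen : PySem.Dict Int Int) (kept : List Int),
    (l.foldl (fun (p : PySem.Dict Int Int × List Int) x =>
        (p.1.insert x (p.1.getD x 0 + 1),
         if p.1.getD x 0 ≥ g x then p.2 ++ [x] else p.2)) (seen, kept)).2
      = kept ++ keepSkip l (fun v => (g v - seen.getD v 0).toNat) := by
  induction l with
  | nil => intro seen kept; simp [keepSkip]
  | cons x l ih =>
    intro seen kept
    simp only [List.foldl_cons]
    by_cases hc : seen.getD x 0 ≥ g x
    · have hf : (g x - seen.getD x 0).toNat = 0 := by omega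
      have hfun : (fun v => (g v - (seen.insert x (seen.getD x 0 + 1)).getD v 0).toNat)
          = (fun v => (g v - seen.getD v 0).toNat) := by
        funext v
        rw [PySem.Dict.getD_insert]
        by_cases hv : v = x
        · subst hv; rw [if_pos rfl]; omega
        · rw [if_neg hv]
      rw [if_pos hc, ih, hfun, keepSkip, if_pos hf, List.append_assoc, List.singleton_append]
    · have hfun : (fun v => (g v - (seen.insert x (seen.getD x 0 + 1)).getD v 0).toNat)
          = (fun v => if v = x then (g v - seen.getD v 0).toNat - 1
                      else (g v - seen.getD v 0).toNat) := by
        funext v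
        rw [PySem.Dict.getD_insert]
        by_cases hv : v = x
        · subst hv; rw [if_pos rfl, if_pos rfl]; omega
        · rw [if_neg hv, if_neg hv]
      rw [if_neg hc, ih, hfun, keepSkip, if_neg (by omega)]

-- ===== VERDICT (by name: the statement is the Claim_ definition above) =====
theorem remove_common_spec : Claim_equal_remove_common := by
  intro a b _
  unfold Spec_remove_common
  simp only [remove_common, remove_common_alt]
  rw [PySem.List.foldl_pyRange_zero_pyGetD' a 0
    (fun (st : List Int × List Int) x =>
      if x ∉ st.2 then (st.1 ++ [x], st.2)
      else (st.1, (PySem.List.remove? st.2 x).getD st.2)) ([], b)]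
  have hcb : ∀ v, (b.foldl (fun (d : PySem.Dict Int Int) x => d.insert x (d.getD x 0 + 1))
      PySem.Dict.empty).getD v 0 = (b.count v : Int) := by
    intro v
    rw [PySem.Dict.getD_foldl_insert_add_one]
    simp [PySem.Dict.getD_empty]
  obtain ⟨f', hle, hEq, hBud⟩ := mainA a b (fun _ => 0)
    (b.foldl (fun (d : PySem.Dict Int Int) x => d.insert x (d.getD x 0 + 1)) PySem.Dict.empty)
    [] (by intro v; simp [hcb v]) (by intro v; simp)
  rw [keepSkip_zero] at hEq
  rw [hEq, keptFold, List.nil_append]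
  congr 2
  show keepSkip b f' = _
  congr 1
  funext v
  rw [PySem.Dict.getD_empty, hcb v, hBud v]
  omega
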